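-- pv_equiv track=rewrite | github.com/CamelliaLilium/FinancialAgent | Open-Manus/金融Agent架构/MultiAgent/金融Agent/app/skill/finance_extraction.py | _group_table_rows_by_blank_lines
-- ===== SOURCE A (Python) =====
-- from typing import Any, Dict, List, Optional, Tuple
--
-- def _group_table_rows_by_blank_lines(rows: List[List[str]]) -> List[List[List[str]]]:
--     groups: List[List[List[str]]] = []
--     current: List[List[str]] = []
--     for cells in rows:
--         non_empty = [cell for cell in cells if (cell or "").strip()]
--         if not non_empty:
--             if current:
--                 groups.append(current)
--                 current = []
--             continue
--         current.append(cells)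
--     if current:
--         groups.append(current)
--     return groups
-- ===== SOURCE B (Python) =====
-- from itertools import groupby
-- from typing import List
--
--
-- def _group_table_rows_by_blank_lines(rows: List[List[str]]) -> List[List[List[str]]]:
--     def is_blank(cells: List[str]) -> bool:
--         return not any((cell or "").strip() for cell in cells)
--
--     return [list(run) for blank, run in groupby(rows, key=is_blank) if not blank]
-- ===== Notes on version B (the rewrite author's own statement) =====
-- stated objective: idiomatic
-- what changed: Replaces A's explicit accumulator loop (groups/current state machine) by itertools.groupby on a blank-row key: maximal runs of equal blankness are formed once and the non-blank runs are collected by a comprehension.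
import Mathlib
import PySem

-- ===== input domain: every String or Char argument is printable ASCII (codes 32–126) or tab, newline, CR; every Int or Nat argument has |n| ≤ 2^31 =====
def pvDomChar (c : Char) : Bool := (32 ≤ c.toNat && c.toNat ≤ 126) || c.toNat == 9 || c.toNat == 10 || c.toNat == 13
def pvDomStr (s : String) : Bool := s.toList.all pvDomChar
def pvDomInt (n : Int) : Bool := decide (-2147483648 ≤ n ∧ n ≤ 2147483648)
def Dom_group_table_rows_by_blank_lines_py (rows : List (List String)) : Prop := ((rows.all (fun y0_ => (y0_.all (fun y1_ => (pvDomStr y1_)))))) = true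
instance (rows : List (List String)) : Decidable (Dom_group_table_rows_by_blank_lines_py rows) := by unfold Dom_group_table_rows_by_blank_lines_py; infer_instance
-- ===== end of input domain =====

-- B replaces A's groups/current accumulator loop with a groupby-style run decomposition (idiomatic; same cost).

-- ===== PORT A =====
-- the loop body of A: state = (groups, current)
def pvStepA (st : List (List (List String)) × List (List String)) (cells : List String) :
    List (List (List String)) × List (List String) :=
  let non_empty := cells.filter (fun cell => !(PySem.Str.strip (if cell == "" then "" else cell) == ""))
  if non_empty.isEmpty then
    if !st.2.isEmpty then (st.1 ++ [st.2], []) else st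
  else
    (st.1, st.2 ++ [cells])

def group_table_rows_by_blank_lines_py (rows : List (List String)) : List (List (List String)) :=
  let st := rows.foldl pvStepA ([], [])
  if !st.2.isEmpty then st.1 ++ [st.2] else st.1

-- ===== PORT B =====
-- is_blank(cells) = not any((cell or "").strip() for cell in cells)
def pvIsBlank (cells : List String) : Bool :=
  !(cells.any (fun cell => !(PySem.Str.strip (if cell == "" then "" else cell) == "")))

-- groupby: peel off the maximal run of rows sharing the first row's blankness; keep non-blank runs
def pvGroupRuns : List (List String) → List (List (List String))
  | [] => []
  | r :: rs =>
    let b := pvIsBlank r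
    let run := rs.takeWhile (fun x => pvIsBlank x == b)
    let rest := rs.dropWhile (fun x => pvIsBlank x == b)
    if b then pvGroupRuns rest else (r :: run) :: pvGroupRuns rest
  termination_by rows => rows.length
  decreasing_by
    all_goals exact Nat.lt_succ_of_le (List.length_dropWhile_le _ _)

def group_table_rows_by_blank_lines_py_alt (rows : List (List String)) : List (List (List String)) :=
  pvGroupRuns rows

-- ===== PRECONDITION & SPEC =====
def Spec_group_table_rows_by_blank_lines_py (rows : List (List String)) (out : List (List (List String))) : Prop := out = group_table_rows_by_blank_lines_py_alt rows
instance (rows : List (List String)) (out : List (List (List String))) : Decidable (Spec_group_table_rows_by_blank_lines_py rows out) := by unfold Spec_group_table_rows_by_blank_lines_py; infer_instance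

-- ===== CLAIM (what is proved, stated in full; the proofs are below) =====
def Claim_equal_group_table_rows_by_blank_lines_py : Prop := ∀ (rows : List (List String)), Dom_group_table_rows_by_blank_lines_py rows → Spec_group_table_rows_by_blank_lines_py rows (group_table_rows_by_blank_lines_py rows)

-- ===== LEMMAS AND PROOFS =====

-- a filtered list is empty iff no element satisfies the predicate
theorem pvFilter_isEmpty_eq_not_any {α : Type} (p : α → Bool) (l : List α) :
    (l.filter p).isEmpty = !(l.any p) := by
  induction l with
  | nil => rfl
  | cons x xs ih =>
    rw [List.filter_cons, List.any_cons]
    cases h : p x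
    · simpa [h] using ih
    · simp [h]

-- A's blank test (filtered list empty) equals B's is_blank
theorem pvFilter_isEmpty_eq_isBlank (cells : List String) :
    (cells.filter (fun cell => !(PySem.Str.strip (if cell == "" then "" else cell) == ""))).isEmpty
      = pvIsBlank cells :=
  pvFilter_isEmpty_eq_not_any _ cells

-- intermediate recursion mirroring A's state evolution (current = c)
def pvGo2 (c : List (List String)) : List (List String) → List (List (List String))
  | [] => if c.isEmpty then [] else [c]
  | r :: rs =>
    if pvIsBlank r then
      (if c.isEmpty then pvGo2 [] rs else c :: pvGo2 [] rs)
    else pvGo2 (c ++ [r]) rs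

-- A's final flush of `current`
def pvFinish (st : List (List (List String)) × List (List String)) : List (List (List String)) :=
  if !st.2.isEmpty then st.1 ++ [st.2] else st.1

theorem pvFoldl_eq_go2 (rows : List (List String)) :
    ∀ (g : List (List (List String))) (c : List (List String)),
      pvFinish (rows.foldl pvStepA (g, c)) = g ++ pvGo2 c rows := by
  induction rows with
  | nil =>
    intro g c
    cases hc : c.isEmpty <;> simp [pvFinish, pvGo2, hc]
  | cons r rs ih =>
    intro g c
    rw [List.foldl_cons]
    have hstep : pvStepA (g, c) r =
        (if pvIsBlank r then (if !c.isEmpty then (g ++ [c], ([] : List (List String))) else (g, c))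
         else (g, c ++ [r])) := by
      simp only [pvStepA]
      rw [pvFilter_isEmpty_eq_isBlank]
    rw [hstep]
    cases hb : pvIsBlank r
    · rw [if_neg (by simp [hb]), ih]
      have h2 : pvGo2 c (r :: rs) = pvGo2 (c ++ [r]) rs := by
        rw [pvGo2, if_neg (by simp [hb])]
      rw [h2]
    · rw [if_pos (by simp [hb])]
      cases hc : c.isEmpty
      · rw [if_pos (by simp [hc]), ih]
        have h2 : pvGo2 c (r :: rs) = c :: pvGo2 [] rs := by
          rw [pvGo2, if_pos (by simp [hb]), if_neg (by simp [hc])]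
        rw [h2, List.append_assoc]
        rfl
      · have hce : c = [] := List.isEmpty_iff.mp hc
        subst hce
        rw [if_neg (by simp), ih]
        have h2 : pvGo2 [] (r :: rs) = pvGo2 [] rs := by
          rw [pvGo2, if_pos (by simp [hb]), if_pos (by simp)]
        rw [h2]

-- unfolding pvGroupRuns on a blank first row
theorem pvGroupRuns_cons_blank (x : List String) (xs : List (List String)) (hx : pvIsBlank x = true) :
    pvGroupRuns (x :: xs) = pvGroupRuns (xs.dropWhile pvIsBlank) := by
  rw [pvGroupRuns]
  simp [hx]

-- unfolding pvGroupRuns on a non-blank first row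
theorem pvGroupRuns_cons_nonblank (x : List String) (xs : List (List String)) (hx : pvIsBlank x = false) :
    pvGroupRuns (x :: xs) =
      (x :: xs.takeWhile (fun y => !pvIsBlank y)) :: pvGroupRuns (xs.dropWhile (fun y => !pvIsBlank y)) := by
  rw [pvGroupRuns]
  simp [hx]

-- dropping leading blank rows does not change the grouping
theorem pvGroupRuns_dropWhile (rs : List (List String)) :
    pvGroupRuns (rs.dropWhile pvIsBlank) = pvGroupRuns rs := by
  cases hr : rs with
  | nil => rfl
  | cons x xs =>
    rw [List.dropWhile_cons]
    cases hx : pvIsBlank x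
    · simp [hx]
    · rw [if_pos (by simp [hx]), pvGroupRuns_cons_blank x xs hx]

theorem pvGo2_eq_groupRuns (rows : List (List String)) :
    pvGo2 [] rows = pvGroupRuns rows ∧
    ∀ c, c ≠ [] →
      pvGo2 c rows =
        (c ++ rows.takeWhile (fun x => !pvIsBlank x)) ::
          pvGroupRuns (rows.dropWhile (fun x => !pvIsBlank x)) := by
  induction rows with
  | nil =>
    constructor
    · simp [pvGo2, pvGroupRuns]
    · intro c hc
      simp [pvGo2, pvGroupRuns, List.isEmpty_iff, hc]
  | cons r rs ih =>
    constructor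
    · cases hb : pvIsBlank r
      · -- first row non-blank: starts a group
        rw [pvGo2, if_neg (by simp [hb]), pvGroupRuns_cons_nonblank r rs hb]
        rw [List.nil_append, (ih.2 [r]) (by simp)]
        rfl
      · -- first row blank: skipped
        rw [pvGo2, if_pos (by simp [hb]), if_pos (by simp), ih.1,
          pvGroupRuns_cons_blank r rs hb, pvGroupRuns_dropWhile]
    · intro c hc
      cases hb : pvIsBlank r
      · -- non-blank row extends the current group
        rw [pvGo2, if_neg (by simp [hb]), (ih.2 (c ++ [r])) (by simp)]
        rw [List.takeWhile_cons, List.dropWhile_cons]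
        simp [hb, List.append_assoc]
      · -- blank row closes the current group
        rw [pvGo2, if_pos (by simp [hb]), if_neg (by simp [List.isEmpty_iff, hc]), ih.1]
        rw [List.takeWhile_cons, List.dropWhile_cons]
        simp only [hb, Bool.not_true]
        rw [if_neg (by simp), if_neg (by simp), List.append_nil]
        rw [pvGroupRuns_cons_blank r rs hb, pvGroupRuns_dropWhile]

-- ===== VERDICT (by name: the statement is the Claim_ definition above) =====
theorem group_table_rows_by_blank_lines_py_spec : Claim_equal_group_table_rows_by_blank_lines_py := by
  intro rows _
  show group_table_rows_by_blank_lines_py rows = group_table_rows_by_blank_lines_py_alt rows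
  have h1 : group_table_rows_by_blank_lines_py rows = pvFinish (rows.foldl pvStepA ([], [])) := rfl
  rw [h1, pvFoldl_eq_go2 rows [] [], (pvGo2_eq_groupRuns rows).1, List.nil_append]
  rfl
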